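-- pv_equiv track=rewrite | github.com/Nikola23-python/siRNA | plot_duplex.py | calculate_connections
-- ===== SOURCE A (Python) =====
-- def calculate_connections(sense_seq, antisense_seq, structure):
--     """Вычисляет связи между цепями"""
--     connections = []
--     stack = []
--     sense_length = len(sense_seq)
--
--     for i, symbol in enumerate(structure):
--         if symbol == '&':
--             continue
--         elif symbol == '(':
--             stack.append(i)
--         elif symbol == ')':
--             if stack:
--                 j = stack.pop()
--                 if j < sense_length and i >= sense_length + 1:
--                     sense_pos = j
--                     anti_pos = i - sense_length - 1
--                     if anti_pos < len(antisense_seq):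
--                         connections.append((sense_pos, anti_pos))
--     return connections
-- ===== SOURCE B (Python) =====
-- def calculate_connections(sense_seq, antisense_seq, structure):
--     """Recursive descent over the nesting structure (no explicit stack):
--     parse(k) consumes characters from k, emitting connections for every
--     bracket pair fully matched inside, and returns the index of the first
--     unmatched ')' (or len(structure))."""
--     n = len(sense_seq)
--     m = len(antisense_seq)
--     L = len(structure)
--     out = []
--
--     def parse(k):
--         while k < L:
--             c = structure[k]
--             if c == ')':
--                 return k
--             if c == '(':
--                 close = parse(k + 1)
--                 if close == L:          # this '(' never closes
--                     return L
--                 if k < n and close >= n + 1 and close - n - 1 < m: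
--                     out.append((k, close - n - 1))
--                 k = close + 1
--             else:                        # '&' and any other symbol
--                 k += 1
--         return L
--
--     k = parse(0)
--     while k < L:                         # top-level unmatched ')' are ignored
--         k = parse(k + 1)
--     return out
-- ===== Notes on version B (the rewrite author's own statement) =====
-- stated objective: alternative
-- what changed: B replaces A's iterative scan with an explicit index stack by a recursive-descent parser over the bracket nesting: parse(k) recursively consumes a balanced region, returns the index of the first unmatched ')', and emits a connection the moment a pair closes; no stack data structure exists in B.
import Mathlib
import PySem

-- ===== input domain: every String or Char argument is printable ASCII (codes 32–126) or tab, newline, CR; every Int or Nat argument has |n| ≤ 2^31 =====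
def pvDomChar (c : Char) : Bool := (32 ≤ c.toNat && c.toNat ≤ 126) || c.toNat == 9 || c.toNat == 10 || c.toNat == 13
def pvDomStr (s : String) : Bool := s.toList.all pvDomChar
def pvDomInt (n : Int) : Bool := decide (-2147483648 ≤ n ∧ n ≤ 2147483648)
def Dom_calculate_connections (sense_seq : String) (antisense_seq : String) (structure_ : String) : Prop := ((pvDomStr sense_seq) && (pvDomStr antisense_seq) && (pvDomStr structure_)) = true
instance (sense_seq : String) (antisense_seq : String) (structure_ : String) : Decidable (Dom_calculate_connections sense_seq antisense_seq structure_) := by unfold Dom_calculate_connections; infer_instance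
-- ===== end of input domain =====

-- B replaces A's explicit-stack scan by a recursive-descent parser over the bracket nesting; objective: alternative decomposition.


-- ===== PORT A =====
-- the body of A's single for-loop: state = (connections, stack); list '.append'/'.pop()' on the stack ported as cons/head
def pvStepA (sense_length al : Int) (st : List (Int × Int) × List Int) (p : Int × Char) : List (Int × Int) × List Int :=
  let i := p.1
  let symbol := p.2
  if symbol = '&' then st
  else if symbol = '(' then (st.1, i :: st.2)
  else if symbol = ')' then
    match st.2 with
    | [] => st
    | j :: rest =>
      if j < sense_length ∧ i ≥ sense_length + 1 then
        if i - sense_length - 1 < al then (st.1 ++ [(j, i - sense_length - 1)], rest)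
        else (st.1, rest)
      else (st.1, rest)
  else st

def calculate_connections (sense_seq : String) (antisense_seq : String) (structure_ : String) : List (Int × Int) :=
  let sense_length : Int := (sense_seq.toList.length : Int)
  let al : Int := (antisense_seq.toList.length : Int)
  ((PySem.List.enumerate structure_.toList).foldl (pvStepA sense_length al) ([], [])).1

-- ===== PORT B =====
-- Source B's parse(k): consume from the front of l; emit a connection the moment a pair closes;
-- result = (connections emitted, none if the end was reached / some (index of first unmatched ')', suffix after it)).
-- The subtype bound on the suffix is Lean's form of 'parse consumed at least the ")"' (termination only).
def pvParseB (n m : Int) : (l : List (Int × Char)) →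
    List (Int × Int) × Option (Int × {r : List (Int × Char) // r.length < l.length})
  | [] => ([], none)
  | (i, c) :: rest =>
    if c = ')' then ([], some (i, ⟨rest, by simp⟩))
    else if c = '(' then
      match pvParseB n m rest with
      | (out1, none) => (out1, none)              -- this '(' never closes
      | (out1, some (cl, ⟨r1, h1⟩)) =>
        let pr := if i < n ∧ cl ≥ n + 1 ∧ cl - n - 1 < m then [(i, cl - n - 1)] else []
        match pvParseB n m r1 with
        | (out2, none) => (out1 ++ pr ++ out2, none)
        | (out2, some (i2, ⟨r2, h2⟩)) =>
          (out1 ++ pr ++ out2, some (i2, ⟨r2, by simp; omega⟩))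
    else
      match pvParseB n m rest with
      | (out1, none) => (out1, none)
      | (out1, some (i2, ⟨r2, h2⟩)) => (out1, some (i2, ⟨r2, by simp; omega⟩))
termination_by l => l.length
decreasing_by all_goals simp <;> omega

-- Source B's top-level driver: repeatedly parse, ignoring each top-level unmatched ')'
def pvTopB (n m : Int) (l : List (Int × Char)) : List (Int × Int) :=
  match pvParseB n m l with
  | (out, none) => out
  | (out, some (_, ⟨r, _h⟩)) => out ++ pvTopB n m r
termination_by l.length
decreasing_by exact _h

def calculate_connections_alt (sense_seq : String) (antisense_seq : String) (structure_ : String) : List (Int × Int) :=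
  let n : Int := (sense_seq.toList.length : Int)
  let m : Int := (antisense_seq.toList.length : Int)
  pvTopB n m (PySem.List.enumerate structure_.toList)

-- ===== PRECONDITION & SPEC =====
def Spec_calculate_connections (sense_seq : String) (antisense_seq : String) (structure_ : String) (out : List (Int × Int)) : Prop := out = calculate_connections_alt sense_seq antisense_seq structure_
instance (sense_seq : String) (antisense_seq : String) (structure_ : String) (out : List (Int × Int)) : Decidable (Spec_calculate_connections sense_seq antisense_seq structure_ out) := by unfold Spec_calculate_connections; infer_instance

-- ===== CLAIM (what is proved, stated in full; the proofs are below) =====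
def Claim_equal_calculate_connections : Prop := ∀ (sense_seq : String) (antisense_seq : String) (structure_ : String), Dom_calculate_connections sense_seq antisense_seq structure_ → Spec_calculate_connections sense_seq antisense_seq structure_ (calculate_connections sense_seq antisense_seq structure_)

-- ===== LEMMAS AND PROOFS =====
-- the filtered pair A appends when ')' at i pops j
def pvPair (n m j i : Int) : List (Int × Int) :=
  if j < n ∧ i ≥ n + 1 ∧ i - n - 1 < m then [(j, i - n - 1)] else []

theorem pvStepA_other (n m : Int) (st : List (Int × Int) × List Int) (i : Int) (c : Char)
    (hop : ¬ c = '(') (hcl : ¬ c = ')') : pvStepA n m st (i, c) = st := by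
  by_cases hamp : c = '&'
  · simp [pvStepA, hamp]
  · simp [pvStepA, hamp, hop, hcl]

theorem pvStepA_open (n m : Int) (st : List (Int × Int) × List Int) (i : Int) :
    pvStepA n m st (i, '(') = (st.1, i :: st.2) := by
  simp [pvStepA]

theorem pvStepA_close_nil (n m : Int) (conns : List (Int × Int)) (i : Int) :
    pvStepA n m (conns, []) (i, ')') = (conns, []) := by
  simp [pvStepA]

theorem pvStepA_close_cons (n m : Int) (conns : List (Int × Int)) (j : Int) (s : List Int) (i : Int) :
    pvStepA n m (conns, j :: s) (i, ')') = (conns ++ pvPair n m j i, s) := by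
  unfold pvStepA pvPair
  split_ifs <;> simp_all

-- main invariant: scanning l with A's loop from (conns, stack) is described by B's parse of l.
-- If parse reaches the end (none), the connections are conns ++ out (whatever the final stack).
-- If parse stops at an unmatched ')' at i with suffix r, the ambient stack is back on top there:
-- with empty stack the ')' is ignored, with top j it pops j and appends pvPair.
theorem pv_parse_foldl (n m : Int) : ∀ (l : List (Int × Char)) (conns : List (Int × Int)) (stack : List Int),
    (match pvParseB n m l with
     | (out, none) => ∃ st', l.foldl (pvStepA n m) (conns, stack) = (conns ++ out, st')
     | (out, some (i, ⟨r, _⟩)) =>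
        (stack = [] → l.foldl (pvStepA n m) (conns, stack) = r.foldl (pvStepA n m) (conns ++ out, [])) ∧
        (∀ j s, stack = j :: s → l.foldl (pvStepA n m) (conns, stack)
            = r.foldl (pvStepA n m) (conns ++ out ++ pvPair n m j i, s)) : Prop) := by
  have H : ∀ (k : Nat) (l : List (Int × Char)), l.length ≤ k → ∀ (conns : List (Int × Int)) (stack : List Int),
      (match pvParseB n m l with
       | (out, none) => ∃ st', l.foldl (pvStepA n m) (conns, stack) = (conns ++ out, st')
       | (out, some (i, ⟨r, _⟩)) =>
          (stack = [] → l.foldl (pvStepA n m) (conns, stack) = r.foldl (pvStepA n m) (conns ++ out, [])) ∧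
          (∀ j s, stack = j :: s → l.foldl (pvStepA n m) (conns, stack)
              = r.foldl (pvStepA n m) (conns ++ out ++ pvPair n m j i, s)) : Prop) := by
    intro k
    induction k with
    | zero =>
      intro l hl conns stack
      have hnil : l = [] := List.length_eq_zero_iff.mp (Nat.le_zero.mp hl)
      subst hnil
      simp [pvParseB]
    | succ k ih =>
      intro l hl conns stack
      match l with
      | [] => simp [pvParseB]
      | (i, c) :: rest =>
        have hrl : rest.length ≤ k := by simp at hl; omega
        by_cases hcl : c = ')'
        · subst hcl
          simp only [pvParseB]
          refine ⟨?_, ?_⟩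
          · intro hst; subst hst
            rw [List.foldl_cons, pvStepA_close_nil]
            simp
          · intro j s hst; subst hst
            rw [List.foldl_cons, pvStepA_close_cons]
            simp
        · by_cases hop : c = '('
          · subst hop
            rcases hrest : pvParseB n m rest with ⟨out1, res1⟩
            match res1 with
            | none =>
              simp only [pvParseB, hrest]
              have := ih rest hrl conns (i :: stack)
              rw [hrest] at this
              obtain ⟨st', hst'⟩ := this
              rw [List.foldl_cons, pvStepA_open]
              exact ⟨st', hst'⟩
            | some ⟨cl, r1, h1⟩ =>
              have hr1l : r1.length ≤ k := by omega
              have ih1 := ih rest hrl conns (i :: stack)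
              rw [hrest] at ih1
              have step1 : ((i, '(') :: rest).foldl (pvStepA n m) (conns, stack)
                  = r1.foldl (pvStepA n m) (conns ++ out1 ++ pvPair n m i cl, stack) := by
                rw [List.foldl_cons, pvStepA_open]
                exact ih1.2 i stack rfl
              rcases hr1 : pvParseB n m r1 with ⟨out2, res2⟩
              have ih2 := ih r1 hr1l (conns ++ out1 ++ pvPair n m i cl) stack
              rw [hr1] at ih2
              match res2 with
              | none =>
                simp only [pvParseB, hrest, hr1]
                obtain ⟨st', hst'⟩ := ih2
                refine ⟨st', ?_⟩
                rw [step1, hst']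
                simp [pvPair]
              | some ⟨i2, r2, h2⟩ =>
                simp only [pvParseB, hrest, hr1]
                refine ⟨?_, ?_⟩
                · intro hst; subst hst
                  rw [step1, ih2.1 rfl]
                  simp [pvPair]
                · intro j s hst; subst hst
                  rw [step1, ih2.2 j s rfl]
                  simp [pvPair]
          · rcases hrest : pvParseB n m rest with ⟨out1, res1⟩
            have ihr := ih rest hrl conns stack
            rw [hrest] at ihr
            have step0 : ((i, c) :: rest).foldl (pvStepA n m) (conns, stack)
                = rest.foldl (pvStepA n m) (conns, stack) := by
              rw [List.foldl_cons, pvStepA_other n m _ i c hop hcl]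
            match res1 with
            | none =>
              simp only [pvParseB, hrest, hop, hcl]
              rw [step0]; exact ihr
            | some ⟨i2, r2, h2⟩ =>
              simp only [pvParseB, hrest, hop, hcl]
              rw [step0] at *
              exact ihr
  intro l
  exact H l.length l le_rfl

theorem pv_top_foldl (n m : Int) : ∀ (l : List (Int × Char)) (conns : List (Int × Int)),
    (l.foldl (pvStepA n m) (conns, [])).1 = conns ++ pvTopB n m l := by
  have H : ∀ (k : Nat) (l : List (Int × Char)), l.length ≤ k → ∀ (conns : List (Int × Int)),
      (l.foldl (pvStepA n m) (conns, [])).1 = conns ++ pvTopB n m l := by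
    intro k
    induction k with
    | zero =>
      intro l hl conns
      have hnil : l = [] := List.length_eq_zero_iff.mp (Nat.le_zero.mp hl)
      subst hnil
      simp [pvTopB, pvParseB]
    | succ k ih =>
      intro l hl conns
      have hp := pv_parse_foldl n m l conns []
      rcases hres : pvParseB n m l with ⟨out, res⟩
      rw [hres] at hp
      match res with
      | none =>
        obtain ⟨st', hst'⟩ := hp
        rw [pvTopB, hres, hst']
      | some ⟨i, r, hr⟩ =>
        have hrk : r.length ≤ k := by omega
        rw [pvTopB, hres]
        rw [hp.1 rfl, ih r hrk (conns ++ out)]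
        simp
  intro l
  exact H l.length l le_rfl

-- ===== VERDICT (by name: the statement is the Claim_ definition above) =====
theorem calculate_connections_spec : Claim_equal_calculate_connections := by
  intro s a st _
  unfold Spec_calculate_connections calculate_connections calculate_connections_alt
  simpa using pv_top_foldl (s.toList.length : Int) (a.toList.length : Int)
    (PySem.List.enumerate st.toList) []
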